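-- pv_equiv track=rewrite | github.com/amandinejvl/Memoire | 2_Analyse_erreurs/identify_errors.py | regroup_errors
-- ===== SOURCE A (Python) =====
-- def regroup_errors(errors: list) -> list:
--     """
--     Regroupe les erreurs aux positions adjacentes.
--
--     Args:
--         errors (list): Liste des tuples (position, gold, ocr).
--
--     Returns:
--         list: Liste des groupes d'erreurs.
--     """
--     # Initialiser la liste pour stocker les groupes d'erreurs
--     groups = []
--
--     # Initialiser des listes temporaires pour suivre les positions, valeurs gold et ocr du groupe actuel
--     current_positions = []
--     current_gold = []
--     current_ocr = []
--
--     # Parcourir la liste des erreurs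
--     for i, (pos, gold, ocr) in enumerate(errors):
--
--         # Vérifier si la position actuelle est adjacente à la précédente
--         if current_positions and pos != current_positions[-1] + 1:
--             # Si ce n'est pas le cas, ajouter le groupe précédent à la liste finale
--             if len(current_positions) > 1:
--                 groups.append((f"{current_positions[0]}-{current_positions[-1]}", "".join(current_gold), "".join(current_ocr)))
--             else:
--                 groups.append((str(current_positions[0]), current_gold[0], current_ocr[0]))
--
--             # Réinitialiser les listes pour le prochain groupe
--             current_positions = []
--             current_gold = []
--             current_ocr = []
--
--         # Ajouter la position, gold et ocr au groupe en cours
--         current_positions.append(pos)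
--         current_gold.append(gold)
--         current_ocr.append(ocr)
--
--     # Ajouter le dernier groupe formé
--     if current_positions:
--         if len(current_positions) > 1:
--             groups.append((f"{current_positions[0]}-{current_positions[-1]}", "".join(current_gold), "".join(current_ocr)))
--         else:
--             groups.append((str(current_positions[0]), current_gold[0], current_ocr[0]))
--
--     return groups
-- ===== SOURCE B (Python) =====
-- def regroup_errors(errors: list) -> list:
--     """Two-pointer scan: find each maximal run of consecutive positions, then format it."""
--     out = []
--     i = 0
--     n = len(errors)
--     while i < n:
--         j = i + 1
--         while j < n and errors[j][0] == errors[j - 1][0] + 1: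
--             j += 1
--         if j - i == 1:
--             p, g, o = errors[i]
--             out.append((str(p), g, o))
--         else:
--             out.append((f"{errors[i][0]}-{errors[j - 1][0]}",
--                         "".join(t[1] for t in errors[i:j]),
--                         "".join(t[2] for t in errors[i:j])))
--         i = j
--     return out
-- ===== Notes on version B (the rewrite author's own statement) =====
-- stated objective: simpler
-- what changed: Replaces A's single pass with three mutable accumulator lists and flush-on-break logic (duplicated at the end) by a two-pointer scan that finds each maximal run of consecutive positions and formats it in place, with no accumulator state and no duplicated flush code.
import Mathlib
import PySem

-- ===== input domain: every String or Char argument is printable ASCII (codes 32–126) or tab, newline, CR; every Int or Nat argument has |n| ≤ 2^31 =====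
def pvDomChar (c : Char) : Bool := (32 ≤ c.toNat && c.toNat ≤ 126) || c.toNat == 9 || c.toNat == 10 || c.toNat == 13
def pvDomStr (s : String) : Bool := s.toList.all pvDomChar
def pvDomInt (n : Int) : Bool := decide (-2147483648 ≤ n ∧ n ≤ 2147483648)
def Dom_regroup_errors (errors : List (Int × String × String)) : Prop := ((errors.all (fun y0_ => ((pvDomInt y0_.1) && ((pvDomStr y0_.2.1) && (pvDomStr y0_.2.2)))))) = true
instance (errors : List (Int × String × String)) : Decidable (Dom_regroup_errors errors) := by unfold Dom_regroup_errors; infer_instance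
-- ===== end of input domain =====

-- B replaces A's accumulator-and-flush pass by a two-pointer maximal-run scan: simpler, same O(n) cost.

-- ===== PORT A =====
-- the group-flushing format used in both of A's (identical) append sites
def pyFlush (cp : List Int) (cg co : List String) : String × String × String :=
  if cp.length > 1 then
    (PySem.Int.toStr (cp.headD 0) ++ "-" ++ PySem.Int.toStr (cp.getLastD 0),
     String.join cg, String.join co)
  else (PySem.Int.toStr (cp.headD 0), cg.headD "", co.headD "")

-- one iteration of A's for-loop over state (groups, current_positions, current_gold, current_ocr)
def pyStep (st : List (String × String × String) × List Int × List String × List String)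
    (e : Int × String × String) :
    List (String × String × String) × List Int × List String × List String :=
  if st.2.1 ≠ [] ∧ e.1 ≠ st.2.1.getLastD 0 + 1 then
    (st.1 ++ [pyFlush st.2.1 st.2.2.1 st.2.2.2], ([e.1], [e.2.1], [e.2.2]))
  else
    (st.1, (st.2.1 ++ [e.1], st.2.2.1 ++ [e.2.1], st.2.2.2 ++ [e.2.2]))

-- the trailing "if current_positions:" flush
def pyFinish (st : List (String × String × String) × List Int × List String × List String) :
    List (String × String × String) :=
  if st.2.1 ≠ [] then st.1 ++ [pyFlush st.2.1 st.2.2.1 st.2.2.2] else st.1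

def regroup_errors (errors : List (Int × String × String)) : List (String × String × String) :=
  pyFinish (errors.foldl pyStep ([], ([], [], [])))

-- ===== PORT B =====
-- inner while loop of B: split off the maximal run continuing position `prev`
def takeRun (prev : Int) : List (Int × String × String) →
    List (Int × String × String) × List (Int × String × String)
  | [] => ([], [])
  | e :: rest =>
    if e.1 = prev + 1 then
      let pr := takeRun e.1 rest
      (e :: pr.1, pr.2)
    else ([], e :: rest)

lemma takeRun_snd_length (prev : Int) (l : List (Int × String × String)) :
    (takeRun prev l).2.length ≤ l.length := by
  induction l generalizing prev with
  | nil => simp [takeRun]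
  | cons e rest ih =>
    simp only [takeRun]
    split
    · exact Nat.le_succ_of_le (ih _)
    · simp

-- format one run (head element p,g,o and the rest r of the run)
def fmtRun (p : Int) (g o : String) (r : List (Int × String × String)) : String × String × String :=
  if r = [] then (PySem.Int.toStr p, g, o)
  else (PySem.Int.toStr p ++ "-" ++ PySem.Int.toStr (((p, g, o) :: r).getLastD (0, "", "")).1,
        String.join (((p, g, o) :: r).map (·.2.1)),
        String.join (((p, g, o) :: r).map (·.2.2)))

-- outer while loop of B: emit a formatted run, continue from the rest
def regroup_errors_alt : List (Int × String × String) → List (String × String × String)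
  | [] => []
  | e :: rest =>
    let pr := takeRun e.1 rest
    fmtRun e.1 e.2.1 e.2.2 pr.1 :: regroup_errors_alt pr.2
termination_by l => l.length
decreasing_by
  simp only [List.length_cons]
  exact Nat.lt_succ_of_le (takeRun_snd_length _ _)

-- ===== PRECONDITION & SPEC =====
def Spec_regroup_errors (errors : List (Int × String × String)) (out : List (String × String × String)) : Prop := out = regroup_errors_alt errors
instance (errors : List (Int × String × String)) (out : List (String × String × String)) : Decidable (Spec_regroup_errors errors out) := by unfold Spec_regroup_errors; infer_instance

-- ===== CLAIM (what is proved, stated in full; the proofs are below) =====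
def Claim_equal_regroup_errors : Prop := ∀ (errors : List (Int × String × String)), Dom_regroup_errors errors → Spec_regroup_errors errors (regroup_errors errors)

-- ===== LEMMAS AND PROOFS =====

lemma fmtRun_eq_pyFlush (p : Int) (g o : String) (r : List (Int × String × String)) :
    fmtRun p g o r
      = pyFlush (p :: r.map (·.1)) (g :: r.map (·.2.1)) (o :: r.map (·.2.2)) := by
  cases r with
  | nil => simp [fmtRun, pyFlush]
  | cons x xs =>
    have hm := List.getLast?_map (f := fun t : Int × String × String => t.1) (l := x :: xs)
    obtain ⟨y, hy⟩ : ∃ y, (x :: xs).getLast? = some y := by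
      cases h : (x :: xs).getLast? with
      | none => simp at h
      | some y => exact ⟨y, rfl⟩
    rw [hy] at hm
    simp only [List.map_cons] at hm
    simp [fmtRun, pyFlush, hy, hm]

-- main loop invariant: folding A's step from a mid-run state, then flushing, is
-- "close the current run extended by takeRun, then B on the remainder"
lemma loop_run (rest : List (Int × String × String)) (prev : Int)
    (groups : List (String × String × String)) (cp : List Int) (cg co : List String)
    (hne : cp ≠ []) (hlast : cp.getLast?.getD 0 = prev) :
    pyFinish (rest.foldl pyStep (groups, (cp, cg, co)))
      = groups
        ++ [pyFlush (cp ++ (takeRun prev rest).1.map (·.1))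
              (cg ++ (takeRun prev rest).1.map (·.2.1))
              (co ++ (takeRun prev rest).1.map (·.2.2))]
        ++ regroup_errors_alt (takeRun prev rest).2 := by
  induction rest generalizing prev groups cp cg co with
  | nil => simp [takeRun, pyFinish, hne, regroup_errors_alt]
  | cons e rest ih =>
    by_cases hq : e.1 = prev + 1
    · have hstep : pyStep (groups, (cp, cg, co)) e
          = (groups, (cp ++ [e.1], cg ++ [e.2.1], co ++ [e.2.2])) := by
        simp [pyStep, hne, List.getLastD_eq_getLast?, hlast, hq]
      have ht : takeRun prev (e :: rest)
          = (e :: (takeRun e.1 rest).1, (takeRun e.1 rest).2) := by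
        simp [takeRun, hq]
      have hlast' : (cp ++ [e.1]).getLast?.getD 0 = e.1 := by simp
      rw [List.foldl_cons, hstep, ih e.1 groups _ _ _ (by simp) hlast', ht]
      simp
    · have hstep : pyStep (groups, (cp, cg, co)) e
          = (groups ++ [pyFlush cp cg co], ([e.1], [e.2.1], [e.2.2])) := by
        simp [pyStep, hne, List.getLastD_eq_getLast?, hlast, hq]
      have ht : takeRun prev (e :: rest) = ([], e :: rest) := by
        simp [takeRun, hq]
      rw [List.foldl_cons, hstep, ih e.1 _ [e.1] [e.2.1] [e.2.2] (by simp) (by simp), ht]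
      rw [show regroup_errors_alt (e :: rest)
          = fmtRun e.1 e.2.1 e.2.2 (takeRun e.1 rest).1
            :: regroup_errors_alt (takeRun e.1 rest).2 from by rw [regroup_errors_alt]]
      rw [fmtRun_eq_pyFlush]
      simp

-- ===== VERDICT (by name: the statement is the Claim_ definition above) =====
theorem regroup_errors_spec : Claim_equal_regroup_errors := by
  intro errors _
  unfold Spec_regroup_errors regroup_errors
  cases errors with
  | nil => simp [pyFinish, regroup_errors_alt]
  | cons e rest =>
    have hstep : pyStep ([], ([], [], [])) e = ([], ([e.1], [e.2.1], [e.2.2])) := by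
      simp [pyStep]
    have := loop_run rest e.1 [] [e.1] [e.2.1] [e.2.2] (by simp) (by simp)
    simp only [List.foldl_cons, hstep, this]
    rw [show regroup_errors_alt (e :: rest)
        = fmtRun e.1 e.2.1 e.2.2 (takeRun e.1 rest).1
          :: regroup_errors_alt (takeRun e.1 rest).2 from by rw [regroup_errors_alt],
      fmtRun_eq_pyFlush]
    simp
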